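-- pv_equiv track=rewrite | github.com/alamorre/interview-prep | Binary/base_conversion.py | baseTen
-- ===== SOURCE A (Python) =====
-- def baseTen(bits: str) -> int:
--     if bits == '1' * 15: return None
--     sign = -1 if bits[0] == '1' else 1
--     ans = 0
--     for i in range(1, len(bits)): # assume only 0s and 1s
--         bit = int(bits[i])
--         if bit == 1:
--             ans += (2**(i-1))
--     return sign * ans # 01010 -> 10
-- ===== SOURCE B (Python) =====
-- def baseTen(bits: str) -> int:
--     if bits == '1' * 15: return None
--     ans = 0
--     for c in reversed(bits[1:]):  # Horner over the payload, right to left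
--         ans = ans * 2 + (1 if int(c) == 1 else 0)
--     return -ans if bits[0] == '1' else ans
-- ===== Notes on version B (the rewrite author's own statement) =====
-- stated objective: alternative
-- what changed: Replaces the per-index power-of-two sum (2**(i-1) recomputed each iteration over range(1,len)) by Horner's method folding right-to-left over the reversed payload characters, with the sign applied at the end.
import Mathlib
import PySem

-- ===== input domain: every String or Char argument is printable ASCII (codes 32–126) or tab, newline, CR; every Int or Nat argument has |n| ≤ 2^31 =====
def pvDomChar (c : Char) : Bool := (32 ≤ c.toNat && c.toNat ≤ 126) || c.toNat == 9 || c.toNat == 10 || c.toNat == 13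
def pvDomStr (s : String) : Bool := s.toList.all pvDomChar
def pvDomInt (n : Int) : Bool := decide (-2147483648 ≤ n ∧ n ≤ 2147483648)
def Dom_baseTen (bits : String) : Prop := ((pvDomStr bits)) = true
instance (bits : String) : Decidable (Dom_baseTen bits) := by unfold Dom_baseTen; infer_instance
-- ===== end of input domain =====

-- B replaces A's per-index power-of-two sum by Horner's method over the reversed payload
-- characters (sign applied at the end); equivalence is proved on all inputs where A returns.

-- ===== PORT A =====
def baseTen (bits : String) : Option Int :=
  if bits = "111111111111111" then none
  else
    match PySem.Str.pyGet? bits 0 with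
    | none => none   -- bits[0] raises IndexError on the empty string (excluded by Pre_)
    | some c0 =>
      let sign : Int := if c0 = '1' then -1 else 1
      let ans : Option Int :=
        (PySem.List.pyRange 1 (PySem.Str.len bits) 1).foldl
          (fun acc i =>
            match acc with
            | none => none
            | some a =>
              match PySem.Str.pyGet? bits i with
              | none => none
              | some ch =>
                match PySem.Int.ofChars? [ch] with   -- int(bits[i]); none = ValueError
                | none => none
                | some bit => if bit = 1 then some (a + 2 ^ (i - 1).toNat) else some a)
          (some 0)
      ans.map (fun a => sign * a)

-- ===== PORT B =====
def baseTen_alt (bits : String) : Option Int :=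
  if bits = "111111111111111" then none
  else
    let ans : Option Int :=
      ((PySem.Str.slice bits (some 1) none).toList.reverse).foldl
        (fun acc ch =>
          match acc, PySem.Int.ofChars? [ch] with   -- int(c); none = ValueError
          | some a, some bit => some (a * 2 + (if bit = 1 then 1 else 0))
          | _, _ => none)
        (some 0)
    match ans, PySem.Str.pyGet? bits 0 with         -- bits[0] raises on empty string
    | some a, some c0 => some (if c0 = '1' then -a else a)
    | _, _ => none

-- ===== PRECONDITION & SPEC =====
-- Pre_ excludes exactly the inputs where Python A raises: the empty string (IndexError on
-- bits[0]) and strings with a non-digit character after position 0 (ValueError in int()).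
def Pre_baseTen (bits : String) : Prop :=
  bits ≠ "" ∧ (bits.toList.drop 1).all PySem.Chars.isdigit = true
instance (bits : String) : Decidable (Pre_baseTen bits) := by unfold Pre_baseTen; infer_instance
def pvWitness_baseTen : String := "01010"

def Spec_baseTen (bits : String) (out : Option Int) : Prop := out = baseTen_alt bits
instance (bits : String) (out : Option Int) : Decidable (Spec_baseTen bits out) := by
  unfold Spec_baseTen; infer_instance

-- ===== CLAIM (what is proved, stated in full; the proofs are below) =====
def Claim_equal_baseTen : Prop :=
  ∀ (bits : String), Dom_baseTen bits → Pre_baseTen bits → Spec_baseTen bits (baseTen bits)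

-- ===== LEMMAS AND PROOFS =====

-- the contribution of one payload character (proof-side abbreviation)
def pvBitOf (c : Char) : Int := if c = '1' then 1 else 0

theorem digit_ofChars (c : Char) (h : PySem.Chars.isdigit c = true) :
    PySem.Int.ofChars? [c] = some ((c.toNat : Int) - 48) ∧
      ((if ((c.toNat : Int) - 48) = 1 then (1:Int) else 0) = pvBitOf c) := by
  have h2 : 48 ≤ c.toNat ∧ c.toNat ≤ 57 := by
    simp [PySem.Chars.isdigit, Char.le_def] at h
    exact ⟨h.1, h.2⟩
  obtain ⟨h2a, h2b⟩ := h2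
  have hc : c = Char.ofNat c.toNat := (Char.ofNat_toNat c).symm
  interval_cases hn : c.toNat <;> rw [hc] <;> exact ⟨by decide, by decide⟩

-- Horner value of a payload appended on the right
theorem pvVal_append (p : List Char) (c : Char) :
    (p ++ [c]).foldr (fun c a => a * 2 + pvBitOf c) 0
      = p.foldr (fun c a => a * 2 + pvBitOf c) 0 + pvBitOf c * 2 ^ p.length := by
  induction p with
  | nil => simp
  | cons x p ih => simp [ih]; ring

-- B's loop: Horner fold over the reversed digit list never fails and computes foldr
theorem pvB_loop (cs : List Char) (hd : ∀ c ∈ cs, PySem.Chars.isdigit c = true) (a0 : Int) :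
    cs.reverse.foldl
        (fun acc ch =>
          match acc, PySem.Int.ofChars? [ch] with
          | some a, some bit => some (a * 2 + (if bit = 1 then 1 else 0))
          | _, _ => none)
        (some a0)
      = some (cs.foldr (fun c a => a * 2 + pvBitOf c) a0) := by
  induction cs with
  | nil => simp
  | cons c cs ih =>
    have hc := digit_ofChars c (hd c (by simp))
    rw [List.reverse_cons, List.foldl_append,
        ih (fun x hx => hd x (List.mem_cons_of_mem _ hx))]
    simp [hc.1, hc.2]

-- A's loop: the indexed power-sum over range(1, 1+k) computes the Horner value of take k
theorem pvA_loop (bits : String) (c0 : Char) (tl : List Char)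
    (hbl : bits.toList = c0 :: tl) (hd : ∀ c ∈ tl, PySem.Chars.isdigit c = true) :
    ∀ k, k ≤ tl.length → ∀ a0 : Int,
    (PySem.List.pyRange 1 (1 + (k : Int)) 1).foldl
        (fun acc i =>
          match acc with
          | none => none
          | some a =>
            match PySem.Str.pyGet? bits i with
            | none => none
            | some ch =>
              match PySem.Int.ofChars? [ch] with
              | none => none
              | some bit => if bit = 1 then some (a + 2 ^ (i - 1).toNat) else some a)
        (some a0)
      = some (a0 + (tl.take k).foldr (fun c a => a * 2 + pvBitOf c) 0) := by
  intro k
  induction k with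
  | zero => intro _ a0; simp [PySem.List.pyRange_one_eq_nil]
  | succ k ih =>
    intro hk a0
    have hk' : k ≤ tl.length := Nat.le_of_succ_le hk
    have hklt : k < tl.length := hk
    have hb : (1 : Int) + (k + 1 : Nat) = (1 + (k : Int)) + 1 := by push_cast; ring
    rw [hb, PySem.List.pyRange_one_succ_right (by omega), List.foldl_append, ih hk' a0]
    have hget : PySem.Str.pyGet? bits (1 + (k : Int)) = some tl[k] := by
      have : (1 : Int) + (k : Int) = ((k + 1 : Nat) : Int) := by push_cast; ring
      rw [this, PySem.Str.pyGet?_natCast, hbl]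
      simp [hklt]
    have hc := digit_ofChars tl[k] (hd _ (tl.getElem_mem hklt))
    have htake : tl.take (k + 1) = tl.take k ++ [tl[k]] := by
      rw [List.take_add_one]; simp [hklt]
    rw [htake, pvVal_append]
    have hpow : ((1 : Int) + (k : Int) - 1).toNat = k := by omega
    have hlen : (tl.take k).length = k := List.length_take_of_le hk'
    simp only [List.foldl_cons, List.foldl_nil, hget, hc.1, hpow]
    have h2 := hc.2
    split_ifs with hb1
    · rw [if_pos hb1] at h2
      rw [hlen, ← h2]; congr 1; ring
    · rw [if_neg hb1] at h2
      rw [hlen, ← h2]; congr 1; ring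

theorem baseTen_spec : Claim_equal_baseTen := by
  intro bits _ hPre
  unfold Spec_baseTen baseTen baseTen_alt
  by_cases hone : bits = "111111111111111"
  · simp [hone]
  · obtain ⟨hne, hdig⟩ := hPre
    obtain ⟨c0, tl, hbl⟩ : ∃ c0 tl, bits.toList = c0 :: tl := by
      cases h : bits.toList with
      | nil => exact absurd (String.toList_eq_nil_iff.mp h) hne
      | cons c0 tl => exact ⟨c0, tl, rfl⟩
    have hd : ∀ c ∈ tl, PySem.Chars.isdigit c = true := by
      rw [hbl] at hdig; simpa [List.all_eq_true] using hdig
    have hget0 : PySem.Str.pyGet? bits 0 = some c0 := by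
      have : (0 : Int) = ((0 : Nat) : Int) := rfl
      rw [this, PySem.Str.pyGet?_natCast, hbl]; rfl
    have hlenb : PySem.Str.len bits = 1 + (tl.length : Int) := by
      simp [hbl]; ring
    have hslice : (PySem.Str.slice bits (some 1) none).toList = tl := by
      rw [PySem.Str.toList_slice, hbl, PySem.Chars.slice_eq_listSlice,
          PySem.List.slice_from (c0 :: tl) (by norm_num : (0:Int) ≤ 1)]
      rfl
    rw [if_neg hone, if_neg hone, hget0, hlenb, hslice,
        pvA_loop bits c0 tl hbl hd tl.length le_rfl 0,
        pvB_loop tl hd 0]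
    simp only [List.take_length, Option.map_some, zero_add]
    by_cases hc0 : c0 = '1' <;> simp [hc0]
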